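-- pv_equiv track=rewrite | github.com/mossbee/authority_verification | authority_verification/doc_utils.py | find_after_juris_list
-- ===== SOURCE A (Python) =====
-- from typing import List
--
-- def find_end_of_sentence(input_texts: List[str], start_index: int) -> int:
-- 	for i in range(start_index, len(input_texts)):
-- 		if input_texts[i][-1] in ['.', '?', '!']:
-- 			return i + 1
-- 	return len(input_texts)
--
-- def find_after_juris_list(input_texts: List[str], start_index: int) -> List:
-- 	output = [start_index]
-- 	end_index = find_end_of_sentence(input_texts, start_index)
-- 	for i in range(start_index, end_index):
-- 		if input_texts[i][-1] == ";":
-- 			output.append(i + 1)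
-- 	output.append(end_index)
-- 	return output
-- ===== SOURCE B (Python) =====
-- def find_after_juris_list(input_texts, start_index):
--     output = [start_index]
--     end_index = len(input_texts)
--     for i in range(start_index, len(input_texts)):
--         last = input_texts[i][-1]
--         if last in ('.', '?', '!'):
--             end_index = i + 1
--             break
--         if last == ';':
--             output.append(i + 1)
--     output.append(end_index)
--     return output
-- ===== Notes on version B (the rewrite author's own statement) =====
-- stated objective: simpler
-- what changed: Inlined the find_end_of_sentence helper and fused A's two scans (terminator search, then a second semicolon pass over the same range) into one early-exit loop that collects semicolon boundaries and stops at the first sentence terminator.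
import Mathlib
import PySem

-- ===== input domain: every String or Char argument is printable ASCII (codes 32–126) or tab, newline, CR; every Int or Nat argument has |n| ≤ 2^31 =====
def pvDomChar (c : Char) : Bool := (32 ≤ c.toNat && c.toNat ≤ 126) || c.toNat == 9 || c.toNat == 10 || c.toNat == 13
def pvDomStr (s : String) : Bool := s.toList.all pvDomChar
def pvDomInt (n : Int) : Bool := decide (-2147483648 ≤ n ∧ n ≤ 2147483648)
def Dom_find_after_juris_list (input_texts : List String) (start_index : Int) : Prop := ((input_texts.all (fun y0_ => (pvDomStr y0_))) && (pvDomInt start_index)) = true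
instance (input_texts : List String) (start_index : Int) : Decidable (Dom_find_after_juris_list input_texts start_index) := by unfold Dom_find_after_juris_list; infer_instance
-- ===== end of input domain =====

-- B inlines A's helper and fuses A's two passes into a single early-exit loop (simpler); same return value wherever A returns.

-- ===== PORT A =====
-- input_texts[i][-1] : last character of the i-th element (Python negative-index semantics); none = IndexError
def pvLast (xs : List String) (i : Int) : Option Char :=
  (PySem.List.pyGet? xs i).bind (fun s => PySem.Str.pyGet? s (-1))

def pvIsTerm : Option Char → Bool
  | some c => c == '.' || c == '?' || c == '!'
  | none => false   -- Python raises here; such inputs are outside Pre_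

def pvFeGo (xs : List String) : List Int → Int
  | [] => (xs.length : Int)
  | i :: rest => if pvIsTerm (pvLast xs i) then i + 1 else pvFeGo xs rest

def find_end_of_sentence (input_texts : List String) (start_index : Int) : Int :=
  pvFeGo input_texts (PySem.List.pyRange start_index (input_texts.length : Int) 1)

def find_after_juris_list (input_texts : List String) (start_index : Int) : List Int :=
  let end_index := find_end_of_sentence input_texts start_index
  ((PySem.List.pyRange start_index end_index 1).foldl
      (fun acc i => if pvLast input_texts i = some ';' then acc ++ [i + 1] else acc)
      [start_index]) ++ [end_index]

-- ===== PORT B =====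
def pvBGo (xs : List String) : List Int → List Int → List Int
  | [], out => out ++ [(xs.length : Int)]
  | i :: rest, out =>
    match pvLast xs i with
    | none => pvBGo xs rest out   -- Python raises here; such inputs are outside Pre_
    | some c =>
      if c = '.' ∨ c = '?' ∨ c = '!' then out ++ [i + 1]
      else if c = ';' then pvBGo xs rest (out ++ [i + 1])
      else pvBGo xs rest out

def find_after_juris_list_alt (input_texts : List String) (start_index : Int) : List Int :=
  pvBGo input_texts (PySem.List.pyRange start_index (input_texts.length : Int) 1) [start_index]

-- ===== PRECONDITION & SPEC =====
def pvNonTermOk : Option Char → Bool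
  | some c => !(c == '.' || c == '?' || c == '!')
  | none => false

-- Pre_ holds exactly when the scan never hits an empty string or an out-of-range (wrapped) index
-- before (or at) the first sentence terminator — i.e. exactly where the Python raises no IndexError.
-- (The leading bound makes it evaluable without enumerating a huge range for far-out start_index.)
def Pre_find_after_juris_list (input_texts : List String) (start_index : Int) : Prop :=
  (input_texts.length : Int) ≤ start_index ∨
  (-(input_texts.length : Int) ≤ start_index ∧
    ∀ i ∈ PySem.List.pyRange start_index (input_texts.length : Int) 1,
      (∀ j ∈ PySem.List.pyRange start_index i 1, pvNonTermOk (pvLast input_texts j) = true) →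
      (pvLast input_texts i).isSome = true)
instance (input_texts : List String) (start_index : Int) : Decidable (Pre_find_after_juris_list input_texts start_index) := by unfold Pre_find_after_juris_list; infer_instance

def pvWitness_find_after_juris_list : List String × Int := (["a;", "b."], 0)

def Spec_find_after_juris_list (input_texts : List String) (start_index : Int) (out : List Int) : Prop := out = find_after_juris_list_alt input_texts start_index
instance (input_texts : List String) (start_index : Int) (out : List Int) : Decidable (Spec_find_after_juris_list input_texts start_index out) := by unfold Spec_find_after_juris_list; infer_instance

-- ===== CLAIM (what is proved, stated in full; the proofs are below) =====
def Claim_equal_find_after_juris_list : Prop := ∀ (input_texts : List String) (start_index : Int), Dom_find_after_juris_list input_texts start_index → Pre_find_after_juris_list input_texts start_index → Spec_find_after_juris_list input_texts start_index (find_after_juris_list input_texts start_index)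

-- ===== LEMMAS AND PROOFS =====

-- the terminator search returns len(xs) or i+1 for some visited index i
lemma pvFeGo_cases (xs : List String) (ids : List Int) :
    pvFeGo xs ids = (xs.length : Int) ∨ ∃ i ∈ ids, pvFeGo xs ids = i + 1 := by
  induction ids with
  | nil => exact Or.inl rfl
  | cons i rest ih =>
    by_cases h : pvIsTerm (pvLast xs i) = true
    · exact Or.inr ⟨i, List.mem_cons_self, by simp [pvFeGo, h]⟩
    · rcases ih with h1 | ⟨j, hj, hje⟩
      · exact Or.inl (by simp [pvFeGo, h, h1])
      · exact Or.inr ⟨j, List.mem_cons_of_mem _ hj, by simp [pvFeGo, h, hje]⟩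

lemma pvFeGo_cons_pos (xs : List String) (i : Int) (rest : List Int)
    (h : pvIsTerm (pvLast xs i) = true) : pvFeGo xs (i :: rest) = i + 1 := by
  simp [pvFeGo, h]

lemma pvFeGo_cons_neg (xs : List String) (i : Int) (rest : List Int)
    (h : pvIsTerm (pvLast xs i) = false) : pvFeGo xs (i :: rest) = pvFeGo xs rest := by
  simp [pvFeGo, h]

lemma pvFeGo_gt (xs : List String) (a : Int) (h : a < (xs.length : Int)) :
    a < pvFeGo xs (PySem.List.pyRange (a + 1) (xs.length : Int) 1) := by
  rcases pvFeGo_cases xs (PySem.List.pyRange (a + 1) (xs.length : Int) 1) with h1 | ⟨i, hi, hie⟩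
  · omega
  · rw [PySem.List.mem_pyRange_one] at hi
    omega

lemma pvMain (xs : List String) : ∀ (k : Nat) (a : Int) (out : List Int),
    ((xs.length : Int) - a).toNat = k →
    ((PySem.List.pyRange a (pvFeGo xs (PySem.List.pyRange a (xs.length : Int) 1)) 1).foldl
        (fun acc i => if pvLast xs i = some ';' then acc ++ [i + 1] else acc) out)
      ++ [pvFeGo xs (PySem.List.pyRange a (xs.length : Int) 1)]
    = pvBGo xs (PySem.List.pyRange a (xs.length : Int) 1) out := by
  intro k
  induction k with
  | zero =>
    intro a out hk
    have hna : (xs.length : Int) ≤ a := by omega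
    rw [PySem.List.pyRange_one_eq_nil hna]
    simp [pvFeGo, pvBGo, PySem.List.pyRange_one_eq_nil hna]
  | succ k ih =>
    intro a out hk
    by_cases hlt : a < (xs.length : Int)
    · rw [PySem.List.pyRange_one_cons hlt]
      cases hcl : pvLast xs a with
      | none =>
        have hnt : pvIsTerm (pvLast xs a) = false := by rw [hcl]; rfl
        have hgt := pvFeGo_gt xs a hlt
        rw [pvFeGo_cons_neg xs a _ hnt, PySem.List.pyRange_one_cons hgt]
        simp only [List.foldl_cons, pvBGo, hcl]
        rw [if_neg (by simp)]
        exact ih (a + 1) out (by omega)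
      | some c =>
        by_cases hterm : c = '.' ∨ c = '?' ∨ c = '!'
        · have ht : pvIsTerm (pvLast xs a) = true := by
            rw [hcl]; rcases hterm with h | h | h <;> simp [pvIsTerm, h]
          rw [pvFeGo_cons_pos xs a _ ht, PySem.List.pyRange_one_singleton]
          simp only [List.foldl_cons, List.foldl_nil, pvBGo, hcl, if_pos hterm]
          rw [if_neg (by rcases hterm with h | h | h <;> simp [h])]
        · have hnt : pvIsTerm (pvLast xs a) = false := by
            rw [hcl]; push Not at hterm
            simp [pvIsTerm, hterm.1, hterm.2.1, hterm.2.2]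
          have hgt := pvFeGo_gt xs a hlt
          rw [pvFeGo_cons_neg xs a _ hnt, PySem.List.pyRange_one_cons hgt]
          simp only [List.foldl_cons, pvBGo, hcl, if_neg hterm]
          by_cases hsemi : c = ';'
          · rw [if_pos (by rw [hsemi]), if_pos hsemi]
            exact ih (a + 1) (out ++ [a + 1]) (by omega)
          · rw [if_neg (by simp [hsemi]), if_neg hsemi]
            exact ih (a + 1) out (by omega)
    · exact absurd hk (by omega)

-- ===== VERDICT (by name: the statement is the Claim_ definition above) =====
theorem find_after_juris_list_spec : Claim_equal_find_after_juris_list := by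
  intro xs s _ _
  show find_after_juris_list xs s = find_after_juris_list_alt xs s
  unfold find_after_juris_list find_after_juris_list_alt find_end_of_sentence
  exact pvMain xs (((xs.length : Int) - s).toNat) s [s] rfl
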